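-- pv_equiv track=rewrite | github.com/tititasf/Estrutural_Analyser | _ROBOS_ABAS/pilares-legacy/src_obfuscated/interfaces/Abcd_Excel.py | _distribuir_largura_especial
-- ===== SOURCE A (Python) =====
-- def _distribuir_largura_especial(largura_total):
--     """
--     Distribui a largura total nos 3 campos (comp1, comp2, comp3)
--     com máximo de 244 por campo.
--
--     Exemplos:
--     - 300 -> [244, 56, 0]
--     - 200 -> [200, 0, 0]
--     - 500 -> [244, 244, 12]
--     """
--     max_por_campo = 244
--     campos = [0, 0, 0]
--     restante = largura_total
--
--     for i in range(3):
--         if restante <= 0: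
--             break
--         if restante >= max_por_campo:
--             campos[i] = max_por_campo
--             restante -= max_por_campo
--         else:
--             campos[i] = restante
--             restante = 0
--
--     return campos
-- ===== SOURCE B (Python) =====
-- def _distribuir_largura_especial(largura_total):
--     # Closed form: field i holds whatever of the total remains past 244*i, clamped to [0, 244].
--     return [min(max(largura_total - 244 * i, 0), 244) for i in range(3)]
-- ===== Notes on version B (the rewrite author's own statement) =====
-- stated objective: idiomatic
-- what changed: Replaced the greedy loop with a running remainder and early break by a closed-form comprehension computing each field independently as min(max(largura_total - 244*i, 0), 244).
import Mathlib
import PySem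

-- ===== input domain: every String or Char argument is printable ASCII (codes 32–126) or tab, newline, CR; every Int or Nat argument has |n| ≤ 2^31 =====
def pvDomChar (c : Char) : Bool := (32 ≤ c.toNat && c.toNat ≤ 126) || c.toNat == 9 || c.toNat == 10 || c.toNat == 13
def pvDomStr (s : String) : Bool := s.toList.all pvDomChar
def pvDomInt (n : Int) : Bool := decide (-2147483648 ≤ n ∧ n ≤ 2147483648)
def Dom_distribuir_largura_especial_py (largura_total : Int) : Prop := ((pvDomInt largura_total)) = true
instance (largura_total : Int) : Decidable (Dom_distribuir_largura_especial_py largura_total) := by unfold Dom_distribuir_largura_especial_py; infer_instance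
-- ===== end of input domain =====

-- B replaces A's greedy remainder loop with a closed form per field (idiomatic; same cost).

-- ===== PORT A =====
-- Literal port: campos = [0,0,0]; for i in range(3): break / assign / subtract.
-- The 'break' is modeled by a Bool flag carried through the fold.
def distribuir_largura_especial_py (largura_total : Int) : List Int :=
  let max_por_campo : Int := 244
  let st := (PySem.List.pyRange 0 3 1).foldl
    (fun (st : List Int × Int × Bool) i =>
      let campos := st.1
      let restante := st.2.1
      let broken := st.2.2
      if broken then st
      else if restante ≤ 0 then (campos, restante, true)
      else if restante ≥ max_por_campo then
        (PySem.List.pySetD campos i max_por_campo, restante - max_por_campo, false)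
      else
        (PySem.List.pySetD campos i restante, 0, false))
    ([0, 0, 0], largura_total, false)
  st.1

-- ===== PORT B =====
def distribuir_largura_especial_py_alt (largura_total : Int) : List Int :=
  (PySem.List.pyRange 0 3 1).map (fun i => min (max (largura_total - 244 * i) 0) 244)

-- ===== PRECONDITION & SPEC =====
def Spec_distribuir_largura_especial_py (largura_total : Int) (out : List Int) : Prop := out = distribuir_largura_especial_py_alt largura_total
instance (largura_total : Int) (out : List Int) : Decidable (Spec_distribuir_largura_especial_py largura_total out) := by unfold Spec_distribuir_largura_especial_py; infer_instance

-- ===== CLAIM (what is proved, stated in full; the proofs are below) =====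
def Claim_equal_distribuir_largura_especial_py : Prop := ∀ (largura_total : Int), Dom_distribuir_largura_especial_py largura_total → Spec_distribuir_largura_especial_py largura_total (distribuir_largura_especial_py largura_total)

-- ===== LEMMAS AND PROOFS =====

-- ===== VERDICT (by name: the statement is the Claim_ definition above) =====
theorem distribuir_largura_especial_py_spec : Claim_equal_distribuir_largura_especial_py := by
  intro t _
  show distribuir_largura_especial_py t = distribuir_largura_especial_py_alt t
  have hset : ∀ (xs : List Int) (i : Int) (v : Int), 0 ≤ i →
      PySem.List.pySetD xs i v = xs.set i.toNat v := fun xs i v h =>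
    PySem.List.pySetD_of_nonneg xs v h
  simp only [distribuir_largura_especial_py, distribuir_largura_especial_py_alt,
    show PySem.List.pyRange 0 3 1 = [0, 1, 2] from by decide, List.foldl, List.map,
    hset _ 0 _ (by norm_num), hset _ 1 _ (by norm_num), hset _ 2 _ (by norm_num)]
  norm_num
  split_ifs <;> simp_all <;> omega
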